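-- pv_equiv track=rewrite | github.com/Ledvin25/Personal | TEC/Semestre 1/Tareas/.history/tarea5_Ledvin_Manuel_Leiva_Mata_20230420212447.py | agrupar
-- ===== SOURCE A (Python) =====
-- def agrupar(lista):
--
--     lista_final = []
--
--     for element in lista:
--         string = str(element)
--         num = []
--         for i in string:
--             if i not in num:
--                 for j in string:
--                     if i == j:
--                         num.append(j)
--         lista_final.append(int(''.join(num)))
--
--     return lista_final
-- ===== SOURCE B (Python) =====
-- def agrupar(lista):
--     resultado = []
--     for element in lista:
--         s = str(element)
--         counts = {}
--         for ch in s: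
--             counts[ch] = counts.get(ch, 0) + 1
--         resultado.append(int(''.join(ch * counts[ch] for ch in counts)))
--     return resultado
-- ===== Notes on version B (the rewrite author's own statement) =====
-- stated objective: alternative
-- what changed: Replaces A's nested rescans (membership test on the output plus a full re-scan of the string per character) with a single counting pass building a dict, then emitting each distinct character repeated by its count in first-occurrence order.
import Mathlib
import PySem

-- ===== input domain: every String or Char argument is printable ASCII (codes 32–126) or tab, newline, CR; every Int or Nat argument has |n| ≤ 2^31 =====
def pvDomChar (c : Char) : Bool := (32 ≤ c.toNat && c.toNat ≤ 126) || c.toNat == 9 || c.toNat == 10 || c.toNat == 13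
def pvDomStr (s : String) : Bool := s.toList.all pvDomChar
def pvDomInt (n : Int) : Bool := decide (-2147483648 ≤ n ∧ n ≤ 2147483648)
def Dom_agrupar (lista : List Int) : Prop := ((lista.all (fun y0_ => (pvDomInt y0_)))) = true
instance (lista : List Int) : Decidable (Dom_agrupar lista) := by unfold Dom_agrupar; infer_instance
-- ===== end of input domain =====

-- B groups each number's digits by a single counting pass (dict of counts, then replicate per
-- distinct char in first-occurrence order) instead of A's nested rescans of the string.
-- int(...) never raises here (its input is a regrouped str(int)), so both ports make it total with .getD 0.

-- ===== PORT A =====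
def agrupar (lista : List Int) : List Int :=
  lista.foldl (fun lista_final element =>
    let string := PySem.Int.toChars element
    let num := string.foldl (fun num i =>
      if num.contains i then num
      else string.foldl (fun num j => if i == j then num ++ [j] else num) num) []
    lista_final ++ [(PySem.Int.ofChars? num).getD 0]) []

-- ===== PORT B =====
def agrupar_alt (lista : List Int) : List Int :=
  lista.map (fun element =>
    let s := PySem.Int.toChars element
    let counts := s.foldl (fun d ch => d.insert ch (d.getD ch 0 + 1)) (PySem.Dict.empty : PySem.Dict Char Int)
    (PySem.Int.ofChars?
      (counts.keys.foldl (fun acc ch => acc ++ List.replicate (counts.getD ch 0).toNat ch) [])).getD 0)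

-- ===== PRECONDITION & SPEC =====
def Spec_agrupar (lista : List Int) (out : List Int) : Prop := out = agrupar_alt lista
instance (lista : List Int) (out : List Int) : Decidable (Spec_agrupar lista out) := by unfold Spec_agrupar; infer_instance

-- ===== CLAIM (what is proved, stated in full; the proofs are below) =====
def Claim_equal_agrupar : Prop := ∀ (lista : List Int), Dom_agrupar lista → Spec_agrupar lista (agrupar lista)

-- ===== LEMMAS AND PROOFS =====

-- A's inner scan over the whole string appends exactly all occurrences of i.
theorem pv_inner_scan (s num : List Char) (i : Char) :
    s.foldl (fun num j => if i == j then num ++ [j] else num) num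
      = num ++ List.replicate (s.count i) i := by
  rw [PySem.List.foldl_append_if_eq_filter]
  congr 1
  have h : (BEq.beq i) = (fun j => j == i) := by
    funext j; cases h : (i == j) <;> cases h2 : (j == i) <;> simp_all
  rw [h, List.filter_beq]

-- membership in the partially built grouped list = membership in the processed prefix
theorem pv_mem_group (s pref : List Char) (hsub : ∀ c ∈ pref, c ∈ s) (i : Char) :
    (i ∈ (PySem.Set.ofList pref).foldl
        (fun acc c => acc ++ List.replicate (s.count c) c) []) ↔ i ∈ pref := by
  rw [PySem.List.foldl_append_eq_flatMap]
  simp only [List.nil_append, List.mem_flatMap, List.mem_replicate]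
  constructor
  · rintro ⟨c, hc, -, rfl⟩
    exact (PySem.Set.mem_ofList _ _).1 hc
  · intro hi
    exact ⟨i, (PySem.Set.mem_ofList _ _).2 hi,
      (List.count_pos_iff.2 (hsub i hi)).ne', rfl⟩

-- A's outer loop invariant
theorem pv_outer_loop (s : List Char) :
    ∀ (todo pref : List Char), pref ++ todo = s →
    todo.foldl (fun num i =>
        if num.contains i then num
        else s.foldl (fun num j => if i == j then num ++ [j] else num) num)
      ((PySem.Set.ofList pref).foldl (fun acc c => acc ++ List.replicate (s.count c) c) [])
    = (PySem.Set.ofList (pref ++ todo)).foldl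
        (fun acc c => acc ++ List.replicate (s.count c) c) [] := by
  intro todo
  induction todo with
  | nil => intro pref h; simp
  | cons i rest ih =>
    intro pref h
    have hsub : ∀ c ∈ pref, c ∈ s := by
      intro c hc; rw [← h]; exact List.mem_append_left _ hc
    have hmem := pv_mem_group s pref hsub i
    have hassoc : pref ++ i :: rest = (pref ++ [i]) ++ rest := by simp
    rw [List.foldl_cons]
    by_cases hi : i ∈ pref
    · have hc : ((PySem.Set.ofList pref).foldl
          (fun acc c => acc ++ List.replicate (s.count c) c) []).contains i = true := by
        rw [List.contains_iff_mem]; exact hmem.2 hi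
      rw [hc]; simp only [if_true]
      have hset : PySem.Set.ofList (pref ++ [i]) = PySem.Set.ofList pref := by
        rw [PySem.Set.ofList_append_singleton,
            PySem.Set.add_of_mem ((PySem.Set.mem_ofList _ _).2 hi)]
      have := ih (pref ++ [i]) (by rw [← hassoc]; exact h)
      rw [hset] at this
      rw [this, hassoc]
    · have hc : ((PySem.Set.ofList pref).foldl
          (fun acc c => acc ++ List.replicate (s.count c) c) []).contains i = false := by
        rw [Bool.eq_false_iff, Ne, List.contains_iff_mem]
        exact fun hmem' => hi (hmem.1 hmem')
      rw [hc]; simp only [Bool.false_eq_true, if_false]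
      rw [pv_inner_scan]
      have hset : PySem.Set.ofList (pref ++ [i]) = PySem.Set.ofList pref ++ [i] := by
        rw [PySem.Set.ofList_append_singleton,
            PySem.Set.add_of_not_mem (fun hmem' => hi ((PySem.Set.mem_ofList _ _).1 hmem'))]
      have := ih (pref ++ [i]) (by rw [← hassoc]; exact h)
      rw [hset, List.foldl_append, List.foldl_cons, List.foldl_nil] at this
      rw [this, hassoc]

-- per-string: A's grouped char list = the canonical grouping
theorem pv_groupA (s : List Char) :
    s.foldl (fun num i =>
        if num.contains i then num
        else s.foldl (fun num j => if i == j then num ++ [j] else num) num) []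
    = (PySem.Set.ofList s).foldl (fun acc c => acc ++ List.replicate (s.count c) c) [] := by
  have := pv_outer_loop s s [] rfl
  simpa using this

-- per-string: B's grouped char list = the canonical grouping
theorem pv_groupB (s : List Char) :
    ((s.foldl (fun d ch => d.insert ch (d.getD ch 0 + 1)) (PySem.Dict.empty : PySem.Dict Char Int)).keys).foldl
      (fun acc ch => acc ++ List.replicate
        (((s.foldl (fun d ch => d.insert ch (d.getD ch 0 + 1)) (PySem.Dict.empty : PySem.Dict Char Int)).getD ch 0).toNat) ch) []
    = (PySem.Set.ofList s).foldl (fun acc c => acc ++ List.replicate (s.count c) c) [] := by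
  rw [PySem.Dict.foldl_insert_getD_add_one_eq_counter, PySem.Dict.keys_counter]
  apply PySem.List.foldl_congr_mem
  intro acc ch _
  rw [PySem.Dict.getD_counter]
  simp

-- ===== VERDICT (by name: the statement is the Claim_ definition above) =====
theorem agrupar_spec : Claim_equal_agrupar := by
  intro lista _
  unfold Spec_agrupar agrupar agrupar_alt
  rw [PySem.List.foldl_append_singleton_eq_map, List.nil_append]
  apply List.map_congr_left
  intro element _
  simp only
  rw [pv_groupA, ← pv_groupB]
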